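-- pv_equiv track=rewrite | github.com/Agro-Marin/tools | field_method_detector/analyzers/matching_engine.py | _are_semantically_incompatible
-- ===== SOURCE A (Python) =====
-- def _are_semantically_incompatible(name1: str, name2: str) -> bool:
--     """Check if two method names represent incompatible semantic patterns"""
--     # Define incompatible prefixes/patterns in Odoo
--     action_patterns = ["action_", "button_", "open_", "show_"]
--     compute_patterns = ["_compute_", "_calculate_", "_get_computed_"]
--     api_patterns = ["api_", "json_", "jsonrpc_"]
--     internal_patterns = ["_internal_", "_private_", "_helper_"]
--
--     # Check if names have incompatible patterns
--     name1_lower = name1.lower()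
--     name2_lower = name2.lower()
--
--     # Action methods should not become compute methods
--     if any(name1_lower.startswith(p) for p in action_patterns) and any(
--         name2_lower.startswith(p) for p in compute_patterns
--     ):
--         return True
--
--     if any(name1_lower.startswith(p) for p in compute_patterns) and any(
--         name2_lower.startswith(p) for p in action_patterns
--     ):
--         return True
--
--     # API methods should not become internal methods
--     if any(name1_lower.startswith(p) for p in api_patterns) and any(
--         name2_lower.startswith(p) for p in internal_patterns
--     ):
--         return True
--
--     return False
-- ===== SOURCE B (Python) =====
-- _CATEGORY_GROUPS = [
--     ("action", ["action_", "button_", "open_", "show_"]),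
--     ("compute", ["_compute_", "_calculate_", "_get_computed_"]),
--     ("api", ["api_", "json_", "jsonrpc_"]),
--     ("internal", ["_internal_", "_private_", "_helper_"]),
-- ]
--
-- _INCOMPATIBLE_PAIRS = {("action", "compute"), ("compute", "action"), ("api", "internal")}
--
--
-- def _category(name: str):
--     lowered = name.lower()
--     for label, prefixes in _CATEGORY_GROUPS:
--         if lowered.startswith(tuple(prefixes)):
--             return label
--     return None
--
--
-- def _are_semantically_incompatible(name1: str, name2: str) -> bool:
--     """Check if two method names represent incompatible semantic patterns"""
--     return (_category(name1), _category(name2)) in _INCOMPATIBLE_PAIRS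
-- ===== Notes on version B (the rewrite author's own statement) =====
-- stated objective: simpler
-- what changed: Replaces the four duplicated any()/startswith blocks by a classify step mapping each name to a single category label (first matching prefix group) followed by a membership test of the ordered label pair in a small incompatible-pair set.
import Mathlib
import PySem

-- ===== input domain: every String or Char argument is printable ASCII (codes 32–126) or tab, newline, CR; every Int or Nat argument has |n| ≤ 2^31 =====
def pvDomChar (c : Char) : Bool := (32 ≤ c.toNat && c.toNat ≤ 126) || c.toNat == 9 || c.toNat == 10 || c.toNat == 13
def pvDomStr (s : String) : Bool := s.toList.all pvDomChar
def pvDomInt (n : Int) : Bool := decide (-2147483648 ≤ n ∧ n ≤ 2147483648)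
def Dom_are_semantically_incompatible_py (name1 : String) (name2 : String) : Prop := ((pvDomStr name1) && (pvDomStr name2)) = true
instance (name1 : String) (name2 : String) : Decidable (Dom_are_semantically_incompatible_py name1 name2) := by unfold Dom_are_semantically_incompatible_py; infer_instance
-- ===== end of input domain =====

-- B replaces A's four duplicated any()/startswith blocks by a classify-then-pair-lookup: simpler decomposition, same cost.


-- ===== PORT A =====
def are_semantically_incompatible_py (name1 : String) (name2 : String) : Bool :=
  let action_patterns : List String := ["action_", "button_", "open_", "show_"]
  let compute_patterns : List String := ["_compute_", "_calculate_", "_get_computed_"]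
  let api_patterns : List String := ["api_", "json_", "jsonrpc_"]
  let internal_patterns : List String := ["_internal_", "_private_", "_helper_"]
  let name1_lower := PySem.Str.lower name1
  let name2_lower := PySem.Str.lower name2
  if (action_patterns.any fun p => PySem.Str.startswith name1_lower p) &&
     (compute_patterns.any fun p => PySem.Str.startswith name2_lower p) then
    true
  else if (compute_patterns.any fun p => PySem.Str.startswith name1_lower p) &&
          (action_patterns.any fun p => PySem.Str.startswith name2_lower p) then
    true
  else if (api_patterns.any fun p => PySem.Str.startswith name1_lower p) &&
          (internal_patterns.any fun p => PySem.Str.startswith name2_lower p) then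
    true
  else
    false

-- ===== PORT B =====
def pvCategoryGroups : List (String × List String) :=
  [("action", ["action_", "button_", "open_", "show_"]),
   ("compute", ["_compute_", "_calculate_", "_get_computed_"]),
   ("api", ["api_", "json_", "jsonrpc_"]),
   ("internal", ["_internal_", "_private_", "_helper_"])]

def pvIncompatiblePairs : List (Option String × Option String) :=
  [(some "action", some "compute"), (some "compute", some "action"), (some "api", some "internal")]

def pvCategory (name : String) : Option String :=
  (pvCategoryGroups.find? (fun g => g.2.any fun p => PySem.Str.startswith (PySem.Str.lower name) p)).map (·.1)

def are_semantically_incompatible_py_alt (name1 : String) (name2 : String) : Bool :=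
  pvIncompatiblePairs.contains (pvCategory name1, pvCategory name2)

-- ===== PRECONDITION & SPEC =====
def Spec_are_semantically_incompatible_py (name1 : String) (name2 : String) (out : Bool) : Prop := out = are_semantically_incompatible_py_alt name1 name2
instance (name1 : String) (name2 : String) (out : Bool) : Decidable (Spec_are_semantically_incompatible_py name1 name2 out) := by unfold Spec_are_semantically_incompatible_py; infer_instance

-- ===== CLAIM (what is proved, stated in full; the proofs are below) =====
def Claim_equal_are_semantically_incompatible_py : Prop := ∀ (name1 : String) (name2 : String), Dom_are_semantically_incompatible_py name1 name2 → Spec_are_semantically_incompatible_py name1 name2 (are_semantically_incompatible_py name1 name2)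

-- ===== LEMMAS AND PROOFS =====

-- a string cannot start with prefixes from two groups whose members are pairwise non-prefixes of each other
theorem pv_not_both (ps qs : List String)
    (h : ∀ p ∈ ps, ∀ q ∈ qs, ¬ p.toList <+: q.toList ∧ ¬ q.toList <+: p.toList)
    (s : String) :
    ((ps.any fun p => PySem.Str.startswith s p) && (qs.any fun q => PySem.Str.startswith s q)) = false := by
  cases hp : (ps.any fun p => PySem.Str.startswith s p) with
  | false => simp
  | true =>
    cases hq : (qs.any fun q => PySem.Str.startswith s q) with
    | false => simp
    | true =>
      exfalso
      simp only [List.any_eq_true] at hp hq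
      obtain ⟨p, hpm, hps⟩ := hp
      obtain ⟨q, hqm, hqs⟩ := hq
      rw [PySem.Str.startswith_eq, PySem.Chars.startswith_iff] at hps hqs
      rcases List.prefix_or_prefix_of_prefix hps hqs with h' | h'
      · exact (h p hpm q hqm).1 h'
      · exact (h p hpm q hqm).2 h'

-- pvCategory as an if-chain over the four group tests
theorem pvCategory_eq (name : String) :
    pvCategory name =
      (if (["action_", "button_", "open_", "show_"].any fun p => PySem.Str.startswith (PySem.Str.lower name) p) then some "action"
       else if (["_compute_", "_calculate_", "_get_computed_"].any fun p => PySem.Str.startswith (PySem.Str.lower name) p) then some "compute"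
       else if (["api_", "json_", "jsonrpc_"].any fun p => PySem.Str.startswith (PySem.Str.lower name) p) then some "api"
       else if (["_internal_", "_private_", "_helper_"].any fun p => PySem.Str.startswith (PySem.Str.lower name) p) then some "internal"
       else none) := by
  unfold pvCategory pvCategoryGroups
  cases h1 : (["action_", "button_", "open_", "show_"].any fun p => PySem.Str.startswith (PySem.Str.lower name) p) with
  | true =>
    rw [List.find?_cons_of_pos (by simpa using h1)]
    simp
  | false =>
    rw [List.find?_cons_of_neg (by simpa using h1)]
    cases h2 : (["_compute_", "_calculate_", "_get_computed_"].any fun p => PySem.Str.startswith (PySem.Str.lower name) p) with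
    | true =>
      rw [List.find?_cons_of_pos (by simpa using h2)]
      simp
    | false =>
      rw [List.find?_cons_of_neg (by simpa using h2)]
      cases h3 : (["api_", "json_", "jsonrpc_"].any fun p => PySem.Str.startswith (PySem.Str.lower name) p) with
      | true =>
        rw [List.find?_cons_of_pos (by simpa using h3)]
        simp
      | false =>
        rw [List.find?_cons_of_neg (by simpa using h3)]
        cases h4 : (["_internal_", "_private_", "_helper_"].any fun p => PySem.Str.startswith (PySem.Str.lower name) p) with
        | true =>
          rw [List.find?_cons_of_pos (by simpa using h4)]
          simp
        | false =>
          rw [List.find?_cons_of_neg (by simpa using h4)]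
          simp

theorem are_semantically_incompatible_py_spec : Claim_equal_are_semantically_incompatible_py := by
  intro name1 name2 _
  unfold Spec_are_semantically_incompatible_py
  unfold are_semantically_incompatible_py are_semantically_incompatible_py_alt
  simp only []
  rw [pvCategory_eq name1, pvCategory_eq name2]
  -- exclusivity of the four groups, for each name (no group prefix is a prefix of another group's)
  have E1 := pv_not_both ["action_", "button_", "open_", "show_"] ["_compute_", "_calculate_", "_get_computed_"] (by decide) (PySem.Str.lower name1)
  have E2 := pv_not_both ["action_", "button_", "open_", "show_"] ["api_", "json_", "jsonrpc_"] (by decide) (PySem.Str.lower name1)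
  have E3 := pv_not_both ["_compute_", "_calculate_", "_get_computed_"] ["api_", "json_", "jsonrpc_"] (by decide) (PySem.Str.lower name1)
  have F1 := pv_not_both ["action_", "button_", "open_", "show_"] ["_compute_", "_calculate_", "_get_computed_"] (by decide) (PySem.Str.lower name2)
  have F2 := pv_not_both ["action_", "button_", "open_", "show_"] ["_internal_", "_private_", "_helper_"] (by decide) (PySem.Str.lower name2)
  have F3 := pv_not_both ["_compute_", "_calculate_", "_get_computed_"] ["_internal_", "_private_", "_helper_"] (by decide) (PySem.Str.lower name2)
  have F4 := pv_not_both ["api_", "json_", "jsonrpc_"] ["_internal_", "_private_", "_helper_"] (by decide) (PySem.Str.lower name2)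
  generalize ha1 : (["action_", "button_", "open_", "show_"].any fun p => PySem.Str.startswith (PySem.Str.lower name1) p) = a1 at E1 E2 ⊢
  generalize hc1 : (["_compute_", "_calculate_", "_get_computed_"].any fun p => PySem.Str.startswith (PySem.Str.lower name1) p) = c1 at E1 E3 ⊢
  generalize hp1 : (["api_", "json_", "jsonrpc_"].any fun p => PySem.Str.startswith (PySem.Str.lower name1) p) = p1 at E2 E3 ⊢
  generalize hi1 : (["_internal_", "_private_", "_helper_"].any fun p => PySem.Str.startswith (PySem.Str.lower name1) p) = i1 at ⊢
  generalize ha2 : (["action_", "button_", "open_", "show_"].any fun p => PySem.Str.startswith (PySem.Str.lower name2) p) = a2 at F1 F2 ⊢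
  generalize hc2 : (["_compute_", "_calculate_", "_get_computed_"].any fun p => PySem.Str.startswith (PySem.Str.lower name2) p) = c2 at F1 F3 ⊢
  generalize hp2 : (["api_", "json_", "jsonrpc_"].any fun p => PySem.Str.startswith (PySem.Str.lower name2) p) = p2 at F4 ⊢
  generalize hi2 : (["_internal_", "_private_", "_helper_"].any fun p => PySem.Str.startswith (PySem.Str.lower name2) p) = i2 at F2 F3 F4 ⊢
  clear ha1 hc1 hp1 hi1 ha2 hc2 hp2 hi2
  revert E1 E2 E3 F1 F2 F3 F4
  revert a1 c1 p1 i1 a2 c2 p2 i2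
  decide
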